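-- pv_equiv track=rewrite | github.com/GreenTeaMagician/Propulsion-Academy | Week1/Day1/python_exercises.py | zero_sum
-- ===== SOURCE A (Python) =====
-- def zero_sum(arguments):
--     output = []
--     temp = []
--     for i in arguments:
--         for j in arguments:
--             if i + j == 0:
--                 first_number = arguments.index(i)
--                 second_number = arguments.index(j)
--                 if first_number not in temp and second_number not in temp:
--                     temp.append(first_number)
--                     temp.append(second_number)
--                     output.append([first_number, second_number])
--     return output
-- ===== SOURCE B (Python) =====
-- def zero_sum(arguments):
--     first = {}
--     for i, v in enumerate(arguments):
--         if v not in first: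
--             first[v] = i
--     output = []
--     used = set()
--     for v, i in first.items():
--         j = first.get(-v)
--         if j is not None and i not in used and j not in used:
--             used.add(i)
--             used.add(j)
--             output.append([i, j])
--     return output
-- ===== Notes on version B (the rewrite author's own statement) =====
-- stated objective: faster
-- what changed: Replaced A's O(n^3) nested value-pair scans (with linear list.index and 'temp' membership inside) by one pass building a value-to-first-index dict, then a single pass over its entries with a used-index set.
import Mathlib
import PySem

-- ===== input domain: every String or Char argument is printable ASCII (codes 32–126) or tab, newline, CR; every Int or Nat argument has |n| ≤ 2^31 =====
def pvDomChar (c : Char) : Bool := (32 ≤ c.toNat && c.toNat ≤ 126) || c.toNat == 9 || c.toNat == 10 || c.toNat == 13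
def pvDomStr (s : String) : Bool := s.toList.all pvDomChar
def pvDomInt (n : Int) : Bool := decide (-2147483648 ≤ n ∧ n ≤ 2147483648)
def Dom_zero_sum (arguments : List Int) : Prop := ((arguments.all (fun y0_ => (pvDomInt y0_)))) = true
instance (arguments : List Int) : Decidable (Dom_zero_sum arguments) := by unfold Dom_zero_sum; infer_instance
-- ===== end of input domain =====

-- B replaces A's O(n^3) nested scans (with list.index and a linear 'temp' list inside) by a
-- value→first-index dict built in one pass plus a single pass with a used-index set.

-- ===== PORT A =====
-- literal port of the nested loops; arguments.index(i) always succeeds here since i ∈ arguments,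
-- so '.getD 0' is exact (the none case is unreachable)
def zero_sum (arguments : List Int) : List (List Int) :=
  (arguments.foldl (fun (st : List (List Int) × List Int) i =>
    arguments.foldl (fun (st : List (List Int) × List Int) j =>
      if i + j == 0 then
        let fn : Int := (((PySem.List.index? arguments i).getD 0 : Nat) : Int)
        let sn : Int := (((PySem.List.index? arguments j).getD 0 : Nat) : Int)
        if !(st.2.contains fn) && !(st.2.contains sn) then
          (st.1 ++ [[fn, sn]], st.2 ++ [fn, sn])
        else st
      else st) st) ([], [])).1

-- ===== PORT B =====
def zero_sum_alt (arguments : List Int) : List (List Int) :=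
  let first : PySem.Dict Int Int :=
    (PySem.List.enumerate arguments 0).foldl
      (fun d p => if d.contains p.2 then d else d.insert p.2 p.1) PySem.Dict.empty
  (first.items.foldl
    (fun (st : List (List Int) × PySem.Set Int) p =>
      match first.get? (-p.1) with
      | none => st
      | some j =>
        if PySem.Set.contains st.2 p.2 || PySem.Set.contains st.2 j then st
        else (st.1 ++ [[p.2, j]], PySem.Set.add (PySem.Set.add st.2 p.2) j))
    ([], PySem.Set.empty)).1

-- ===== PRECONDITION & SPEC =====
def Spec_zero_sum (arguments : List Int) (out : List (List Int)) : Prop := out = zero_sum_alt arguments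
instance (arguments : List Int) (out : List (List Int)) : Decidable (Spec_zero_sum arguments out) := by unfold Spec_zero_sum; infer_instance

-- ===== CLAIM (what is proved, stated in full; the proofs are below) =====
def Claim_equal_zero_sum : Prop := ∀ (arguments : List Int), Dom_zero_sum arguments → Spec_zero_sum arguments (zero_sum arguments)

-- ===== LEMMAS AND PROOFS =====

-- first index of v in l, as Python int (meaningful when v ∈ l)
def fidx (l : List Int) (v : Int) : Int := (((PySem.List.index? l v).getD 0 : Nat) : Int)

-- the dict 'first' built by B
def firstD (l : List Int) : PySem.Dict Int Int :=
  (PySem.List.enumerate l 0).foldl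
    (fun d p => if d.contains p.2 then d else d.insert p.2 p.1) PySem.Dict.empty

lemma items_firstD (l : List Int) :
    (firstD l).items = (PySem.List.dedup l).map (fun v => (v, fidx l v)) := by
  induction l using List.reverseRecOn with
  | nil => rfl
  | append_singleton l x ih =>
    have hfold : firstD (l ++ [x]) =
        (if (firstD l).contains x then firstD l else (firstD l).insert x (l.length : Int)) := by
      simp [firstD, PySem.List.enumerate_append, List.foldl_append,
            PySem.List.enumerate_cons, PySem.List.enumerate_nil]
    have hkeys : (firstD l).keys = PySem.List.dedup l := by
      simp only [PySem.Dict.keys, ih, List.map_map, Function.comp_def]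
      simp
    have hcont : (firstD l).contains x = decide (x ∈ l) := by
      rw [PySem.Dict.contains_eq_decide_mem_keys, hkeys]
      simp
    by_cases hx : x ∈ l
    · rw [hfold, hcont]
      simp only [hx, decide_true, if_true, ih]
      have hd : PySem.List.dedup (l ++ [x]) = PySem.List.dedup l := by
        simp only [PySem.List.dedup_eq_ofList, PySem.Set.ofList_append_singleton]
        exact PySem.Set.add_of_mem (by simpa [PySem.Set.mem_ofList] using hx)
      rw [hd]
      refine List.map_congr_left (fun v hv => ?_)
      have hvl : v ∈ l := by
        simpa [PySem.List.mem_dedup] using hv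
      simp only [fidx]
      rw [PySem.List.index?_append_of_mem _ hvl]
    · rw [hfold, hcont]
      simp only [hx, decide_false, Bool.false_eq_true, if_false]
      rw [PySem.Dict.items_insert_of_not_contains _ _ (by rw [hcont]; simp [hx]), ih]
      have hd : PySem.List.dedup (l ++ [x]) = PySem.List.dedup l ++ [x] := by
        simp only [PySem.List.dedup_eq_ofList, PySem.Set.ofList_append_singleton]
        exact PySem.Set.add_of_not_mem (by simpa [PySem.Set.mem_ofList] using hx)
      rw [hd, List.map_append]
      congr 1
      · refine List.map_congr_left (fun v hv => ?_)
        have hvl : v ∈ l := by simpa [PySem.List.mem_dedup] using hv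
        simp only [fidx]
        rw [PySem.List.index?_append_of_mem _ hvl]
      · simp only [fidx, List.map_cons, List.map_nil]
        rw [PySem.List.index?_append_singleton_self l x hx]
        simp

lemma keys_firstD (l : List Int) : (firstD l).keys = PySem.List.dedup l := by
  simp only [PySem.Dict.keys, items_firstD, List.map_map, Function.comp_def]
  simp

lemma get?_firstD (l : List Int) (v : Int) :
    (firstD l).get? v = if v ∈ l then some (fidx l v) else none := by
  by_cases hv : v ∈ l
  · rw [if_pos hv]
    apply PySem.Dict.get?_of_mem_items
    · rw [items_firstD]
      exact List.mem_map_of_mem (by simpa using hv)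
    · rw [keys_firstD]
      exact PySem.List.nodup_dedup l
  · rw [if_neg hv, (PySem.Dict.get?_eq_none_iff_not_mem_keys _ _).2]
    rw [keys_firstD]
    simpa using hv

-- A's effective step for value i (once per distinct value with -i present)
def stepA (args : List Int) (i : Int) (st : List (List Int) × List Int) :
    List (List Int) × List Int :=
  if !(st.2.contains (fidx args i)) && !(st.2.contains (fidx args (-i))) then
    (st.1 ++ [[fidx args i, fidx args (-i)]], st.2 ++ [fidx args i, fidx args (-i)])
  else st

-- the inner-loop lambda of A's port, with fn/sn written via fidx (the same term)
def innerLam (args : List Int) (i : Int) :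
    (List (List Int) × List Int) → Int → (List (List Int) × List Int) :=
  fun st j =>
    if i + j == 0 then
      if !(st.2.contains (fidx args i)) && !(st.2.contains (fidx args j)) then
        (st.1 ++ [[fidx args i, fidx args j]], st.2 ++ [fidx args i, fidx args j])
      else st
    else st

def outerF (args : List Int) (st : List (List Int) × List Int) (i : Int) :
    List (List Int) × List Int :=
  if (-i) ∈ args then stepA args i st else st

lemma stepA_idem (args : List Int) (i : Int) (st : List (List Int) × List Int) :
    stepA args i (stepA args i st) = stepA args i st := by
  unfold stepA
  by_cases h : (!(st.2.contains (fidx args i)) && !(st.2.contains (fidx args (-i)))) = true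
  · rw [if_pos h]
    simp
  · rw [if_neg h, if_neg h]

lemma innerLam_neg (args : List Int) (i : Int) (st : List (List Int) × List Int) :
    innerLam args i st (-i) = stepA args i st := by
  simp [innerLam, stepA]

lemma inner_aux (args : List Int) (i : Int) (l : List Int) (st : List (List Int) × List Int) :
    l.foldl (innerLam args i) (stepA args i st) = stepA args i st := by
  induction l with
  | nil => rfl
  | cons j l ih =>
    by_cases h : i + j = 0
    · have hj : j = -i := by omega
      subst hj
      rw [List.foldl_cons, innerLam_neg, stepA_idem, ih]
    · have : innerLam args i (stepA args i st) j = stepA args i st := by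
        simp only [innerLam, beq_iff_eq, if_neg h]
      rw [List.foldl_cons, this, ih]

lemma inner_eq (args : List Int) (i : Int) (l : List Int) (st : List (List Int) × List Int) :
    l.foldl (innerLam args i) st = if (-i) ∈ l then stepA args i st else st := by
  induction l generalizing st with
  | nil => rfl
  | cons j l ih =>
    by_cases h : i + j = 0
    · have hj : j = -i := by omega
      subst hj
      rw [List.foldl_cons, innerLam_neg, inner_aux, if_pos List.mem_cons_self]
    · have hne : (-i) ≠ j := by omega
      have : innerLam args i st j = st := by
        simp only [innerLam, beq_iff_eq, if_neg h]
      rw [List.foldl_cons, this, ih]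
      simp [List.mem_cons, hne]

lemma zero_sum_eq_foldl_outer (args : List Int) :
    zero_sum args = (args.foldl (outerF args) ([], [])).1 := by
  have hfun : (fun (st : List (List Int) × List Int) i => args.foldl (innerLam args i) st)
      = outerF args := by
    funext st i
    rw [inner_eq]
    rfl
  show (args.foldl (fun st i => args.foldl (innerLam args i) st) ([], [])).1 = _
  rw [hfun]

-- 'value i already handled': its index or its partner's index is in temp
def Ph (args : List Int) (i : Int) (st : List (List Int) × List Int) : Prop :=
  (-i) ∈ args → (fidx args i ∈ st.2 ∨ fidx args (-i) ∈ st.2)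

lemma temp_grow (args : List Int) (j : Int) (st : List (List Int) × List Int) (x : Int)
    (hx : x ∈ st.2) : x ∈ (outerF args st j).2 := by
  unfold outerF stepA
  split_ifs <;> simp [hx]

lemma Ph_noop (args : List Int) (i : Int) (st : List (List Int) × List Int)
    (h : Ph args i st) : outerF args st i = st := by
  unfold outerF
  by_cases hm : (-i) ∈ args
  · rw [if_pos hm]
    unfold stepA
    have hc : (!(st.2.contains (fidx args i)) && !(st.2.contains (fidx args (-i)))) = false := by
      rcases h hm with h1 | h1 <;> simp [h1]
    rw [hc]
    rfl
  · rw [if_neg hm]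

lemma Ph_establish (args : List Int) (i : Int) (st : List (List Int) × List Int) :
    Ph args i (outerF args st i) := by
  intro hm
  unfold outerF stepA
  rw [if_pos hm]
  by_cases hc : (!(st.2.contains (fidx args i)) && !(st.2.contains (fidx args (-i)))) = true
  · rw [if_pos hc]
    left
    simp
  · rw [if_neg hc]
    simp only [Bool.and_eq_true, Bool.not_eq_true', not_and_or, Bool.not_eq_false] at hc
    rcases hc with h1 | h1
    · left; simpa using h1
    · right; simpa using h1

lemma Ph_preserve (args : List Int) (i j : Int) (st : List (List Int) × List Int)
    (h : Ph args i st) : Ph args i (outerF args st j) := by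
  intro hm
  exact (h hm).imp (temp_grow args j st _) (temp_grow args j st _)

lemma Ph_fold_preserve (args : List Int) (i : Int) (m : List Int)
    (st : List (List Int) × List Int) (h : Ph args i st) :
    Ph args i (m.foldl (outerF args) st) := by
  induction m generalizing st with
  | nil => exact h
  | cons y m ih => exact ih _ (Ph_preserve args i y st h)

lemma Ph_after_fold (args : List Int) (i : Int) (m : List Int)
    (st : List (List Int) × List Int) (hi : i ∈ m) :
    Ph args i (m.foldl (outerF args) st) := by
  revert st hi
  induction m with
  | nil => intro st hi; cases hi
  | cons y m ih =>
    intro st hi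
    rw [List.foldl_cons]
    rcases List.mem_cons.1 hi with h | h
    · subst h
      exact Ph_fold_preserve args i m _ (Ph_establish args i st)
    · exact ih _ h

lemma foldl_outer_dedup (args : List Int) (l : List Int) (st : List (List Int) × List Int) :
    l.foldl (outerF args) st = (PySem.List.dedup l).foldl (outerF args) st := by
  induction l using List.reverseRecOn with
  | nil => rfl
  | append_singleton l x ih =>
    rw [List.foldl_append, ih]
    by_cases hx : x ∈ l
    · have hd : PySem.List.dedup (l ++ [x]) = PySem.List.dedup l := by
        simp only [PySem.List.dedup_eq_ofList, PySem.Set.ofList_append_singleton]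
        exact PySem.Set.add_of_mem (by simpa using hx)
      rw [hd, List.foldl_cons, List.foldl_nil]
      exact Ph_noop args x _ (Ph_after_fold args x _ st (by simpa using hx))
    · have hd : PySem.List.dedup (l ++ [x]) = PySem.List.dedup l ++ [x] := by
        simp only [PySem.List.dedup_eq_ofList, PySem.Set.ofList_append_singleton]
        exact PySem.Set.add_of_not_mem (by simpa using hx)
      rw [hd, List.foldl_append]

-- B's loop body, on a pair produced by 'first.items'
def bLam (args : List Int) :
    (List (List Int) × PySem.Set Int) → (Int × Int) → (List (List Int) × PySem.Set Int) :=
  fun st p =>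
    match (firstD args).get? (-p.1) with
    | none => st
    | some j =>
      if PySem.Set.contains st.2 p.2 || PySem.Set.contains st.2 j then st
      else (st.1 ++ [[p.2, j]], PySem.Set.add (PySem.Set.add st.2 p.2) j)

lemma rel_fold (args : List Int) (m : List Int)
    (stA : List (List Int) × List Int) (stB : List (List Int) × PySem.Set Int)
    (h1 : stA.1 = stB.1) (h2 : ∀ x, x ∈ stA.2 ↔ x ∈ stB.2) :
    (m.foldl (outerF args) stA).1
      = (m.foldl (fun st v => bLam args st (v, fidx args v)) stB).1 := by
  induction m generalizing stA stB with
  | nil => exact h1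
  | cons v m ih =>
    rw [List.foldl_cons, List.foldl_cons]
    by_cases hm : (-v) ∈ args
    · have hget : (firstD args).get? (-v) = some (fidx args (-v)) := by
        rw [get?_firstD, if_pos hm]
      by_cases hc : fidx args v ∈ stA.2 ∨ fidx args (-v) ∈ stA.2
      · have hA : outerF args stA v = stA := Ph_noop args v stA (fun _ => hc)
        have hB : bLam args stB (v, fidx args v) = stB := by
          simp only [bLam, hget]
          have hct : (PySem.Set.contains stB.2 (fidx args v)
              || PySem.Set.contains stB.2 (fidx args (-v))) = true := by
            simp only [Bool.or_eq_true, PySem.Set.contains_iff]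
            rcases hc with h | h
            · exact Or.inl ((h2 _).1 h)
            · exact Or.inr ((h2 _).1 h)
          rw [hct]
          rfl
        rw [hA, hB]
        exact ih stA stB h1 h2
      · push Not at hc
        have hA : outerF args stA v
            = (stA.1 ++ [[fidx args v, fidx args (-v)]],
               stA.2 ++ [fidx args v, fidx args (-v)]) := by
          unfold outerF stepA
          rw [if_pos hm, if_pos (by simp [hc.1, hc.2])]
        have hB : bLam args stB (v, fidx args v)
            = (stB.1 ++ [[fidx args v, fidx args (-v)]],
               PySem.Set.add (PySem.Set.add stB.2 (fidx args v)) (fidx args (-v))) := by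
          simp only [bLam, hget]
          have hb1 : PySem.Set.contains stB.2 (fidx args v) = false := by
            simpa [PySem.Set.contains_iff _ _] using fun h => hc.1 ((h2 _).2 h)
          have hb2 : PySem.Set.contains stB.2 (fidx args (-v)) = false := by
            simpa [PySem.Set.contains_iff _ _] using fun h => hc.2 ((h2 _).2 h)
          rw [hb1, hb2]
          rfl
        rw [hA, hB]
        refine ih _ _ (by simpa using h1) ?_
        intro x
        simp only [List.mem_append, PySem.Set.mem_add, List.mem_cons ,
          List.not_mem_nil, or_false]
        rw [h2 x]
        tauto
    · have hA : outerF args stA v = stA := by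
        unfold outerF
        rw [if_neg hm]
      have hB : bLam args stB (v, fidx args v) = stB := by
        simp only [bLam, get?_firstD, if_neg hm]
      rw [hA, hB]
      exact ih stA stB h1 h2

lemma zero_sum_alt_eq (args : List Int) :
    zero_sum_alt args
      = ((PySem.List.dedup args).foldl
          (fun st v => bLam args st (v, fidx args v)) ([], PySem.Set.empty)).1 := by
  show ((firstD args).items.foldl (bLam args) ([], PySem.Set.empty)).1 = _
  rw [items_firstD, List.foldl_map]

-- ===== VERDICT (by name: the statement is the Claim_ definition above) =====
theorem zero_sum_spec : Claim_equal_zero_sum := by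
  intro args _
  show zero_sum args = zero_sum_alt args
  rw [zero_sum_eq_foldl_outer, foldl_outer_dedup, zero_sum_alt_eq]
  exact rel_fold args _ ([], []) ([], PySem.Set.empty) rfl (by intro x; rfl)
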